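-- pv_equiv track=rewrite | github.com/kcerauno/SLOT_AND_HMM | hypothesis/02_compound_hmm/source/base_count_analysis.py | get_boundary_positions
-- ===== SOURCE A (Python) =====
-- def get_boundary_positions(splits):
--     """各境界の (B-end位置, B-start位置, 境界インデックス) を返す。"""
--     boundaries = []
--     cumlen = 0
--     for i, base in enumerate(splits[:-1]):
--         cumlen += len(base)
--         boundaries.append({
--             "bend_pos":    cumlen - 1,
--             "bstart_pos":  cumlen,
--             "boundary_idx": i,         # 0-indexed: 0=第1境界, 1=第2境界, ...
--             "n_bases":     len(splits),
--         })
--     return boundaries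
-- ===== SOURCE B (Python) =====
-- def get_boundary_positions(splits):
--     """各境界の (B-end位置, B-start位置, 境界インデックス) を返す。"""
--     # Pass 1: materialise the full prefix-sum table of segment lengths.
--     cum = [0]
--     for s in splits:
--         cum.append(cum[-1] + len(s))
--     # Pass 2: emit one record per boundary, reading positions from the table.
--     n = len(splits)
--     return [{"bend_pos": cum[i + 1] - 1,
--              "bstart_pos": cum[i + 1],
--              "boundary_idx": i,
--              "n_bases": n}
--             for i in range(n - 1)]
-- ===== Notes on version B (the rewrite author's own statement) =====
-- stated objective: alternative
-- what changed: A fuses the running length sum with record emission in one enumerate loop over splits[:-1]; B first materialises a complete prefix-sum table of all segment lengths and then emits the boundary records in a separate index-driven comprehension reading from that table.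
import Mathlib
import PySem

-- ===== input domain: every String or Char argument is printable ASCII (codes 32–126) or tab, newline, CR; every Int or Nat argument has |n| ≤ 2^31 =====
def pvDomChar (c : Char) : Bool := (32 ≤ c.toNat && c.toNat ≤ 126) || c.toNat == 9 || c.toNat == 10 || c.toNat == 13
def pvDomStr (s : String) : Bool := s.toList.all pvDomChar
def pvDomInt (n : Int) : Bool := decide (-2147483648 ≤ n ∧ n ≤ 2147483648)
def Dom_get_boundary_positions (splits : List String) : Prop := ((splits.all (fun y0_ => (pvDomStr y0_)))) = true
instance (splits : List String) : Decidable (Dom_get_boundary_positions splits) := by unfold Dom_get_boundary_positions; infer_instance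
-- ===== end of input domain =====

-- B replaces A's fused running-sum/emit loop by a materialised prefix-sum table plus a separate index-driven emit pass (alternative decomposition, same cost).


-- ===== PORT A =====
def get_boundary_positions (splits : List String) : List (List (String × Int)) :=
  let st := (PySem.List.enumerate (PySem.List.slice splits none (some (-1))) 0).foldl
    (fun (st : List (List (String × Int)) × Int) ib =>
      let cumlen := st.2 + PySem.Str.len ib.2
      (st.1 ++ [[("bend_pos", cumlen - 1), ("bstart_pos", cumlen),
                 ("boundary_idx", ib.1), ("n_bases", (splits.length : Int))]],
       cumlen))
    (([] : List (List (String × Int))), (0 : Int))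
  st.1

-- ===== PORT B =====
def get_boundary_positions_alt (splits : List String) : List (List (String × Int)) :=
  let cum := splits.foldl (fun (acc : List Int) s => acc ++ [acc.getLastD 0 + PySem.Str.len s]) [0]
  let n : Int := splits.length
  (PySem.List.pyRange 0 (n - 1) 1).map (fun i =>
    [("bend_pos", PySem.List.pyGetD cum (i + 1) 0 - 1),
     ("bstart_pos", PySem.List.pyGetD cum (i + 1) 0),
     ("boundary_idx", i), ("n_bases", n)])

-- ===== PRECONDITION & SPEC =====
def Spec_get_boundary_positions (splits : List String) (out : List (List (String × Int))) : Prop := out = get_boundary_positions_alt splits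
instance (splits : List String) (out : List (List (String × Int))) : Decidable (Spec_get_boundary_positions splits out) := by unfold Spec_get_boundary_positions; infer_instance

-- ===== CLAIM (what is proved, stated in full; the proofs are below) =====
def Claim_equal_get_boundary_positions : Prop := ∀ (splits : List String), Dom_get_boundary_positions splits → Spec_get_boundary_positions splits (get_boundary_positions splits)

-- ===== LEMMAS AND PROOFS =====

/-- Sum of the lengths of the first `j` strings. -/
def pvPsum (xs : List String) (j : Nat) : Int := ((xs.take j).map PySem.Str.len).sum

/-- One boundary record, parameterised by the cumulative length, the index and n. -/
def pvRow (n c i : Int) : List (String × Int) :=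
  [("bend_pos", c - 1), ("bstart_pos", c), ("boundary_idx", i), ("n_bases", n)]

lemma pvPsum_cons (y : String) (t : List String) (k : Nat) :
    pvPsum (y :: t) (k + 1) = PySem.Str.len y + pvPsum t k := by
  simp [pvPsum]

/-- Invariant of A's fused loop. -/
lemma pvA_loop (n : Int) (ys : List String) :
    ∀ (s0 : Int) (acc : List (List (String × Int))) (c : Int),
    (PySem.List.enumerate ys s0).foldl
      (fun (st : List (List (String × Int)) × Int) ib =>
        let cumlen := st.2 + PySem.Str.len ib.2
        (st.1 ++ [pvRow n cumlen ib.1], cumlen)) (acc, c)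
    = (acc ++ (List.range ys.length).map (fun k => pvRow n (c + pvPsum ys (k + 1)) (s0 + k)),
       c + pvPsum ys ys.length) := by
  induction ys with
  | nil => intro s0 acc c; simp [PySem.List.enumerate_nil, pvPsum]
  | cons y t ih =>
      intro s0 acc c
      rw [PySem.List.enumerate_cons, List.foldl_cons, ih]
      rw [Prod.ext_iff]
      constructor
      · simp only [List.length_cons, List.range_succ_eq_map, List.map_cons, List.map_map,
          List.append_assoc, List.singleton_append]
        congr 1
        rw [List.cons.injEq]
        refine ⟨by simp [pvRow, pvPsum], ?_⟩
        apply List.map_congr_left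
        intro k _
        simp only [Function.comp_apply, pvPsum_cons, Nat.succ_eq_add_one, pvRow,
          List.cons.injEq, Prod.mk.injEq, true_and, and_true]
        push_cast
        refine ⟨by ring, by ring, by ring⟩
      · simp only [List.length_cons, pvPsum_cons]; ring

/-- Invariant of B's table-building loop: the table is the prefix sums. -/
lemma pvB_table (ys : List String) :
    ∀ (cs : List Int),
    ys.foldl (fun (acc : List Int) s => acc ++ [acc.getLastD 0 + PySem.Str.len s]) cs
    = cs ++ (List.range ys.length).map (fun j => cs.getLastD 0 + pvPsum ys (j + 1)) := by
  induction ys with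
  | nil => intro cs; simp
  | cons y t ih =>
      intro cs
      rw [List.foldl_cons, ih]
      rw [List.length_cons, List.range_succ_eq_map, List.map_cons, List.map_map, List.append_assoc,
        List.singleton_append]
      congr 1
      rw [List.cons.injEq]
      refine ⟨by simp [pvPsum], ?_⟩
      apply List.map_congr_left
      intro k _
      simp only [Function.comp_apply, pvPsum_cons, Nat.succ_eq_add_one, List.getLastD_concat]
      ring

lemma pvPsum_dropLast (xs : List String) (k : Nat) (h : k ≤ xs.length - 1) :
    pvPsum xs.dropLast k = pvPsum xs k := by
  simp only [pvPsum, List.dropLast_eq_take, List.take_take, Nat.min_eq_left h]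

-- ===== VERDICT (by name: the statement is the Claim_ definition above) =====
theorem get_boundary_positions_spec : Claim_equal_get_boundary_positions := by
  intro splits _
  unfold Spec_get_boundary_positions get_boundary_positions get_boundary_positions_alt
  simp only [PySem.List.slice_to_neg_one]
  have hA := pvA_loop (splits.length : Int) splits.dropLast 0 [] 0
  simp only [pvRow] at hA
  rw [hA]
  rw [pvB_table splits [0]]
  rw [PySem.List.pyRange_one ]
  simp only [List.map_map, List.nil_append, List.length_dropLast]
  have hlen : (((splits.length : Int)) - 1 - 0).toNat = splits.length - 1 := by omega
  rw [hlen]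
  apply List.map_congr_left
  intro k hk
  rw [List.mem_range] at hk
  have hidx : (0 : Int) + (k : Int) + 1 = ((k + 1 : Nat) : Int) := by push_cast; ring
  simp only [Function.comp_apply, hidx, PySem.List.pyGetD_natCast]
  have hget : ([0] ++ (List.range splits.length).map
      (fun j => ([0] : List Int).getLastD 0 + pvPsum splits (j + 1))).getD (k + 1) 0
      = pvPsum splits (k + 1) := by
    have hk' : k < splits.length := by omega
    simp [List.getD, hk']
  rw [hget, pvPsum_dropLast splits (k + 1) (by omega)]
  simp
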